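-- pv_equiv track=rewrite | github.com/JDJCREATES/Google-Deepmind-2 | ships-backend/app/graphs/quality_gates.py | check_no_critical_errors
-- ===== SOURCE A (Python) =====
-- from typing import Dict, List, Any, Optional, Callable, Literal
--
-- def check_no_critical_errors(state: Dict[str, Any]) -> bool:
--     """Check if there are no blocking errors."""
--     error_log = state.get("error_log", [])
--
--     # No errors at all
--     if not error_log:
--         return True
--
--     # Check for critical error markers
--     critical_keywords = ["SyntaxError", "ImportError", "ModuleNotFoundError", "CRITICAL"]
--
--     for error in error_log:
--         error_str = str(error).lower()
--         if any(keyword.lower() in error_str for keyword in critical_keywords):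
--             return False
--
--     return True
-- ===== SOURCE B (Python) =====
-- def check_no_critical_errors(state):
--     """Check if there are no blocking errors."""
--     critical_keywords = ["SyntaxError", "ImportError", "ModuleNotFoundError", "CRITICAL"]
--     # One combined lowercased text; '\n' separator occurs in no keyword,
--     # so no keyword can match across the boundary of two log entries.
--     blob = "\n".join(str(e).lower() for e in state.get("error_log", []))
--     return not any(k.lower() in blob for k in critical_keywords)
-- ===== Notes on version B (the rewrite author's own statement) =====
-- stated objective: simpler
-- what changed: Instead of looping over log entries and testing every keyword inside each entry with an early return, B joins all lowercased entries into one newline-separated string and tests each keyword once against that single string.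
import Mathlib
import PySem

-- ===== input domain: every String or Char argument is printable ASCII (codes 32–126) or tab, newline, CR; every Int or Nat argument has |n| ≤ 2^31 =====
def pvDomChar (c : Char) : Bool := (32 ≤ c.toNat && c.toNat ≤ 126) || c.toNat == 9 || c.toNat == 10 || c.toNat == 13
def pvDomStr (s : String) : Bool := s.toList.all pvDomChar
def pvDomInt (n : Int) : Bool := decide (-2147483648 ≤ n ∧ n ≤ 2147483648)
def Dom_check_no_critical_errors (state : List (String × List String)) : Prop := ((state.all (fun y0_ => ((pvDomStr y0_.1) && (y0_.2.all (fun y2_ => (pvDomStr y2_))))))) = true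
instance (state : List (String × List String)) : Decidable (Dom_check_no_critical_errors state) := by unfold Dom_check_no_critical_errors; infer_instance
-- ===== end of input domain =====

-- B joins the lowercased log into one newline-separated string and scans it once per keyword,
-- replacing A's per-entry loop with its early return; objective: simpler.

-- ===== PORT A =====
-- the 'for error in error_log: … return False' loop, with its early return
def pvLoopA (kws : List String) : List String → Bool
  | [] => true
  | e :: rest =>
      if kws.any (fun k => PySem.Str.isIn (PySem.Str.lower k) (PySem.Str.lower e)) then false
      else pvLoopA kws rest

def check_no_critical_errors (state : List (String × List String)) : Bool :=
  let error_log := (List.lookup "error_log" state).getD []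
  if error_log.isEmpty then true
  else pvLoopA ["SyntaxError", "ImportError", "ModuleNotFoundError", "CRITICAL"] error_log

-- ===== PORT B =====
def check_no_critical_errors_alt (state : List (String × List String)) : Bool :=
  let blob := PySem.Str.join "\n" (((List.lookup "error_log" state).getD []).map PySem.Str.lower)
  !(["SyntaxError", "ImportError", "ModuleNotFoundError", "CRITICAL"].any
      (fun k => PySem.Str.isIn (PySem.Str.lower k) blob))

-- ===== PRECONDITION & SPEC =====
def Spec_check_no_critical_errors (state : List (String × List String)) (out : Bool) : Prop := out = check_no_critical_errors_alt state
instance (state : List (String × List String)) (out : Bool) : Decidable (Spec_check_no_critical_errors state out) := by unfold Spec_check_no_critical_errors; infer_instance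

-- ===== CLAIM (what is proved, stated in full; the proofs are below) =====
def Claim_equal_check_no_critical_errors : Prop := ∀ (state : List (String × List String)), Dom_check_no_critical_errors state → Spec_check_no_critical_errors state (check_no_critical_errors state)

-- ===== LEMMAS AND PROOFS =====

-- a pattern not containing c cannot straddle an occurrence of c
lemma pv_infix_append_cons (p a b : List Char) (c : Char) (hc : c ∉ p) :
    p <:+: a ++ c :: b ↔ p <:+: a ∨ p <:+: b := by
  constructor
  · rintro ⟨s, t, h⟩
    rcases (Nat.lt_or_ge a.length (s.length + p.length)).symm with hle | hmid
    · -- the match lies inside a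
      have hsp : s ++ p <+: a ++ c :: b := ⟨t, by simpa [List.append_assoc] using h⟩
      have hpre : s ++ p <+: a :=
        List.prefix_of_prefix_length_le hsp (a.prefix_append _) (by simpa using hle)
      obtain ⟨t', ht'⟩ := hpre
      exact Or.inl ⟨s, t', by simpa [List.append_assoc] using ht'⟩
    rcases (Nat.lt_or_ge s.length (a.length + 1)).symm with hge | hlt
    · -- the match lies inside b
      have hlen : s.length + p.length + t.length = a.length + 1 + b.length := by
        have := congrArg List.length h
        simpa [List.length_append, Nat.add_assoc, Nat.add_comm, Nat.add_left_comm] using this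
      have hsuf : p ++ t <:+ a ++ c :: b := ⟨s, by simpa [List.append_assoc] using h⟩
      have hbsuf : b <:+ a ++ c :: b := ⟨a ++ [c], by simp⟩
      have hpt : p ++ t <:+ b := by
        refine List.suffix_of_suffix_length_le hsuf hbsuf ?_
        simp only [List.length_append]
        omega
      obtain ⟨s', hs'⟩ := hpt
      exact Or.inr ⟨s', t, by simpa [List.append_assoc] using hs'⟩
    · -- the occurrence of c at index a.length would lie inside p
      exfalso
      have hq := congrArg (fun l => l[a.length]?) h
      have hrhs : (a ++ c :: b)[a.length]? = some c := by
        rw [List.getElem?_append_right (Nat.le_refl _)]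
        simp
      have hslen : s.length ≤ a.length := by omega
      have hlhs : (s ++ p ++ t)[a.length]? = p[a.length - s.length]? := by
        rw [List.getElem?_append_left (by simp only [List.length_append]; omega),
            List.getElem?_append_right hslen]
      have hcp : p[a.length - s.length]? = some c := by
        simp only at hq
        rw [← hlhs, hq, hrhs]
      exact hc (List.mem_of_getElem? hcp)
  · rintro (⟨s, t, h⟩ | ⟨s, t, h⟩)
    · exact ⟨s, t ++ c :: b, by simp [← h, List.append_assoc]⟩
    · exact ⟨a ++ c :: s, t, by simp [← h, List.append_assoc]⟩

-- a nonempty newline-free pattern is in the '\n'-join iff it is in one of the parts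
lemma pv_infix_join (p : List Char) (c : Char) (hc : c ∉ p) (hp : p ≠ []) :
    ∀ xss : List (List Char), (p <:+: PySem.Chars.join [c] xss ↔ ∃ cs ∈ xss, p <:+: cs)
  | [] => by
      simp [PySem.Chars.join_nil, List.infix_nil, hp]
  | [x] => by
      simp [PySem.Chars.join_singleton]
  | x :: y :: rest => by
      rw [PySem.Chars.join_cons_cons, List.append_assoc]
      simp only [List.singleton_append]
      rw [pv_infix_append_cons p x _ c hc, pv_infix_join p c hc hp (y :: rest)]
      simp

-- string-level form of pv_infix_join
lemma pv_isIn_join (kw : String) (hc : '\n' ∉ kw.toList) (hp : kw.toList ≠ [])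
    (parts : List String) :
    PySem.Str.isIn kw (PySem.Str.join "\n" parts) = parts.any (fun s => PySem.Str.isIn kw s) := by
  rw [Bool.eq_iff_iff, PySem.Str.isIn_iff_infix, PySem.Str.toList_join,
      show ("\n" : String).toList = ['\n'] from rfl,
      pv_infix_join kw.toList '\n' hc hp, List.any_eq_true]
  simp [PySem.Chars.isIn_iff_infix]

-- A's loop returns true iff no entry contains any keyword
lemma pv_loopA_eq (kws : List String) (es : List String) :
    pvLoopA kws es =
      !(es.any (fun e => kws.any (fun k => PySem.Str.isIn (PySem.Str.lower k) (PySem.Str.lower e)))) := by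
  induction es with
  | nil => rfl
  | cons e rest ih =>
      by_cases h : (kws.any (fun k => PySem.Str.isIn (PySem.Str.lower k) (PySem.Str.lower e))) = true
      · simp only [pvLoopA, List.any_cons, h, Bool.true_or, Bool.not_true]
        exact if_pos trivial
      · have h' : (kws.any (fun k => PySem.Str.isIn (PySem.Str.lower k) (PySem.Str.lower e))) = false :=
          Bool.eq_false_iff.mpr h
        simp only [pvLoopA, List.any_cons, h', Bool.false_or, ih]
        exact if_neg (by simp)

-- the two nested 'any's commute
lemma pv_any_comm (es kws : List String) (P : String → String → Bool) :
    es.any (fun e => kws.any (fun k => P e k)) = kws.any (fun k => es.any (fun e => P e k)) := by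
  rw [Bool.eq_iff_iff]
  simp only [List.any_eq_true]
  exact ⟨fun ⟨e, he, k, hk, h⟩ => ⟨k, hk, e, he, h⟩, fun ⟨k, hk, e, he, h⟩ => ⟨e, he, k, hk, h⟩⟩

-- both programs on the extracted error_log
lemma pv_main (l : List String) :
    (if l.isEmpty then true
     else pvLoopA ["SyntaxError", "ImportError", "ModuleNotFoundError", "CRITICAL"] l) =
    !(["SyntaxError", "ImportError", "ModuleNotFoundError", "CRITICAL"].any
        (fun k => PySem.Str.isIn (PySem.Str.lower k) (PySem.Str.join "\n" (l.map PySem.Str.lower)))) := by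
  cases l with
  | nil => decide
  | cons x xs =>
      rw [List.isEmpty_cons, if_neg (by decide), pv_loopA_eq,
          pv_any_comm (x :: xs) _ (fun e k => PySem.Str.isIn (PySem.Str.lower k) (PySem.Str.lower e))]
      simp only [List.any_cons, List.any_nil]
      rw [pv_isIn_join _ (by decide) (by decide), pv_isIn_join _ (by decide) (by decide),
          pv_isIn_join _ (by decide) (by decide), pv_isIn_join _ (by decide) (by decide)]
      simp only [List.any_map]
      rfl

-- ===== VERDICT (by name: the statement is the Claim_ definition above) =====
theorem check_no_critical_errors_spec : Claim_equal_check_no_critical_errors := by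
  intro state _
  show check_no_critical_errors state = check_no_critical_errors_alt state
  simp only [check_no_critical_errors, check_no_critical_errors_alt]
  exact pv_main _
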